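-- pv_equiv track=rewrite | github.com/Think-Big-Media/3.1-ui-war-room-netlify | src/backend/utils/text_processing.py | detect_document_language
-- ===== SOURCE A (Python) =====
-- def detect_document_language(text: str) -> str:
--     """
--     Simple language detection for documents.
--
--     Args:
--         text: Input text
--
--     Returns:
--         Language code (default: 'en')
--     """
--     if not text:
--         return "en"
--
--     # Simple heuristic based on common words
--     spanish_indicators = ["el", "la", "de", "que", "y", "en", "un", "es", "se", "no"]
--     french_indicators = ["le", "de", "et", "à", "un", "il", "être", "et", "en", "avoir"]
--     german_indicators = [
--         "der",
--         "die",
--         "und",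
--         "in",
--         "den",
--         "von",
--         "zu",
--         "das",
--         "mit",
--         "sich",
--     ]
--
--     text_lower = text.lower()
--
--     # Count indicators
--     spanish_count = sum(1 for word in spanish_indicators if word in text_lower)
--     french_count = sum(1 for word in french_indicators if word in text_lower)
--     german_count = sum(1 for word in german_indicators if word in text_lower)
--
--     # Return most likely language
--     if spanish_count > 3:
--         return "es"
--     elif french_count > 3:
--         return "fr"
--     elif german_count > 3:
--         return "de"
--     else:
--         return "en"  # Default to English
-- ===== SOURCE B (Python) =====
-- def detect_document_language(text: str) -> str:
--     if not text:
--         return "en"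
--
--     spanish = ["el", "la", "de", "que", "y", "en", "un", "es", "se", "no"]
--     french = ["le", "de", "et", "\u00e0", "un", "il", "\u00eatre", "et", "en", "avoir"]
--     german = ["der", "die", "und", "in", "den", "von", "zu", "das", "mit", "sich"]
--
--     t = text.lower()
--     # Single text-driven sweep: at each position of the lowered text, record which
--     # indicator patterns start there, instead of one substring search per indicator.
--     patterns = spanish + french + german
--     found = set()
--     for i in range(len(t)):
--         for p in patterns:
--             if p not in found and t.startswith(p, i):
--                 found.add(p)
--
--     for code, indicators in (("es", spanish), ("fr", french), ("de", german)):
--         if sum(w in found for w in indicators) > 3: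
--             return code
--     return "en"
-- ===== Notes on version B (the rewrite author's own statement) =====
-- stated objective: alternative
-- what changed: Instead of one substring search per indicator word, B makes a single text-driven sweep over the positions of the lowered text, recording into a set which indicator patterns start at each position, and then scores each language by membership of its (verbatim, duplicate-keeping) indicator list in that found-set with early return in the priority order es, fr, de.
import Mathlib
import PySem

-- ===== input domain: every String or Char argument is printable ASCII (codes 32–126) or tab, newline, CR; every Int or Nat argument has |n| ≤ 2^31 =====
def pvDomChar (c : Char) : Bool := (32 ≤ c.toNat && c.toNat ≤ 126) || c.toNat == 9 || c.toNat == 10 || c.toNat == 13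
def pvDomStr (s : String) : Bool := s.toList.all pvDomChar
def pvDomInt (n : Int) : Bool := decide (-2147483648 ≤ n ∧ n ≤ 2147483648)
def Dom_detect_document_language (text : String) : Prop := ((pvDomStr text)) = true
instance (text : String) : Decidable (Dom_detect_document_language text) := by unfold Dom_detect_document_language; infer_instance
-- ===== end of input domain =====

-- B replaces A's one-substring-search-per-indicator counting by a single text-driven sweep
-- that records which indicator patterns start at each position (objective: alternative).

-- ===== PORT A =====
def detect_document_language (text : String) : String :=
  if text = "" then "en"
  else
    let spanish_indicators : List String := ["el", "la", "de", "que", "y", "en", "un", "es", "se", "no"]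
    let french_indicators : List String := ["le", "de", "et", "à", "un", "il", "être", "et", "en", "avoir"]
    let german_indicators : List String := ["der", "die", "und", "in", "den", "von", "zu", "das", "mit", "sich"]
    let text_lower := PySem.Str.lower text
    let spanish_count : Int := spanish_indicators.foldl (fun acc w => if PySem.Str.isIn w text_lower then acc + 1 else acc) 0
    let french_count : Int := french_indicators.foldl (fun acc w => if PySem.Str.isIn w text_lower then acc + 1 else acc) 0
    let german_count : Int := german_indicators.foldl (fun acc w => if PySem.Str.isIn w text_lower then acc + 1 else acc) 0
    if spanish_count > 3 then "es"
    else if french_count > 3 then "fr"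
    else if german_count > 3 then "de"
    else "en"

-- ===== PORT B =====
def pvSpanish : List String := ["el", "la", "de", "que", "y", "en", "un", "es", "se", "no"]
def pvFrench : List String := ["le", "de", "et", "à", "un", "il", "être", "et", "en", "avoir"]
def pvGerman : List String := ["der", "die", "und", "in", "den", "von", "zu", "das", "mit", "sich"]
def pvPatterns : List String := pvSpanish ++ pvFrench ++ pvGerman

-- t.startswith(p, i) with 0 ≤ i is ported by hand as Chars.startswith on the slice t[i:]
-- (exact for nonnegative i, the only values range produces here).
def pvSweep (t : String) : PySem.Set String :=
  (PySem.List.pyRange 0 (PySem.Str.len t) 1).foldl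
    (fun found i =>
      pvPatterns.foldl
        (fun f p =>
          if PySem.Set.contains f p then f
          else if PySem.Chars.startswith (PySem.List.slice t.toList (some i) none) p.toList then PySem.Set.add f p
          else f)
        found)
    PySem.Set.empty

-- the final for-loop with early return over (code, indicators) pairs
def pvScore (found : PySem.Set String) : List (String × List String) → String
  | [] => "en"
  | (code, indicators) :: rest =>
      if (indicators.countP (fun w => PySem.Set.contains found w) : Int) > 3 then code
      else pvScore found rest

def detect_document_language_alt (text : String) : String :=
  if text = "" then "en"
  else
    let t := PySem.Str.lower text
    let found := pvSweep t
    pvScore found [("es", pvSpanish), ("fr", pvFrench), ("de", pvGerman)]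

-- ===== PRECONDITION & SPEC =====
def Spec_detect_document_language (text : String) (out : String) : Prop := out = detect_document_language_alt text
instance (text : String) (out : String) : Decidable (Spec_detect_document_language text out) := by unfold Spec_detect_document_language; infer_instance

-- ===== CLAIM (what is proved, stated in full; the proofs are below) =====
def Claim_equal_detect_document_language : Prop := ∀ (text : String), Dom_detect_document_language text → Spec_detect_document_language text (detect_document_language text)

-- ===== LEMMAS AND PROOFS =====

-- A's 0/1-sum is a countP
theorem pv_foldl_count (t : String) (l : List String) (n : Int) :
    l.foldl (fun acc w => if PySem.Str.isIn w t then acc + 1 else acc) n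
      = n + (l.countP (fun w => PySem.Str.isIn w t) : Int) := by
  induction l generalizing n with
  | nil => simp
  | cons w rest ih =>
      simp only [List.foldl_cons, List.countP_cons, ih]
      split_ifs <;> push_cast <;> ring

-- membership after the inner pattern loop at one position
theorem pv_mem_inner (t : String) (i : Int) (ps : List String) (found : PySem.Set String) (x : String) :
    (x ∈ ps.foldl
        (fun f p =>
          if PySem.Set.contains f p then f
          else if PySem.Chars.startswith (PySem.List.slice t.toList (some i) none) p.toList then PySem.Set.add f p
          else f)
        found)
      ↔ x ∈ found ∨ (x ∈ ps ∧ PySem.Chars.startswith (PySem.List.slice t.toList (some i) none) x.toList = true) := by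
  induction ps generalizing found with
  | nil => simp
  | cons p rest ih =>
      simp only [List.foldl_cons, List.mem_cons]
      split_ifs with hc hs
      · -- p already recorded
        rw [ih]
        have hp : p ∈ found := (PySem.Set.contains_iff found p).mp hc
        constructor
        · rintro (h | ⟨h1, h2⟩)
          · exact Or.inl h
          · exact Or.inr ⟨Or.inr h1, h2⟩
        · rintro (h | ⟨h1 | h1, h2⟩)
          · exact Or.inl h
          · exact Or.inl (h1 ▸ hp)
          · exact Or.inr ⟨h1, h2⟩
      · -- p starts here: added
        rw [ih]
        simp only [PySem.Set.mem_add]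
        constructor
        · rintro ((h | h) | ⟨h1, h2⟩)
          · exact Or.inl h
          · exact Or.inr ⟨Or.inl h, h ▸ hs⟩
          · exact Or.inr ⟨Or.inr h1, h2⟩
        · rintro (h | ⟨h1 | h1, h2⟩)
          · exact Or.inl (Or.inl h)
          · exact Or.inl (Or.inr h1)
          · exact Or.inr ⟨h1, h2⟩
      · -- p does not start here
        rw [ih]
        constructor
        · rintro (h | ⟨h1, h2⟩)
          · exact Or.inl h
          · exact Or.inr ⟨Or.inr h1, h2⟩
        · rintro (h | ⟨h1 | h1, h2⟩)
          · exact Or.inl h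
          · exact absurd (h1 ▸ h2) hs
          · exact Or.inr ⟨h1, h2⟩

-- membership after sweeping positions 0..b-1
theorem pv_mem_outer (t : String) (b : Int) (x : String) :
    (x ∈ (PySem.List.pyRange 0 b 1).foldl
        (fun found i =>
          pvPatterns.foldl
            (fun f p =>
              if PySem.Set.contains f p then f
              else if PySem.Chars.startswith (PySem.List.slice t.toList (some i) none) p.toList then PySem.Set.add f p
              else f)
            found)
        PySem.Set.empty)
      ↔ x ∈ pvPatterns ∧ ∃ i : Int, 0 ≤ i ∧ i < b ∧
          PySem.Chars.startswith (PySem.List.slice t.toList (some i) none) x.toList = true := by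
  by_cases hb : 0 ≤ b
  · obtain ⟨n, rfl⟩ := Int.eq_ofNat_of_zero_le hb
    induction n with
    | zero =>
        rw [PySem.List.pyRange_one_eq_nil (by simp)]
        simp only [List.foldl_nil]
        constructor
        · intro hmem
          simp [PySem.Set.empty] at hmem
        · rintro ⟨-, i, h1, h2, -⟩
          omega
    | succ m ih =>
        rw [show ((m + 1 : ℕ) : Int) = (m : Int) + 1 by push_cast; ring,
            PySem.List.pyRange_one_succ_right (by positivity), List.foldl_append]
        simp only [List.foldl_cons, List.foldl_nil]
        rw [pv_mem_inner, ih (by positivity)]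
        constructor
        · rintro (⟨h1, i, hi0, hib, hs⟩ | ⟨h1, h2⟩)
          · exact ⟨h1, i, hi0, by omega, hs⟩
          · exact ⟨h1, (m : Int), by positivity, by omega, h2⟩
        · rintro ⟨h1, i, hi0, hib, hs⟩
          by_cases him : i < (m : Int)
          · exact Or.inl ⟨h1, i, hi0, him, hs⟩
          · have : i = (m : Int) := by omega
            subst this
            exact Or.inr ⟨h1, hs⟩
  · rw [PySem.List.pyRange_one_eq_nil (by omega)]
    simp only [List.foldl_nil]
    constructor
    · intro hmem
      simp [PySem.Set.empty] at hmem
    · rintro ⟨-, i, h1, h2, -⟩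
      omega

-- a nonempty pattern is in the swept set iff Python's 'p in t' holds
theorem pv_sweep_found (t : String) (x : String) (hx : x ∈ pvPatterns) (hne : x.toList ≠ []) :
    (x ∈ pvSweep t) ↔ PySem.Str.isIn x t = true := by
  unfold pvSweep
  rw [pv_mem_outer]
  rw [PySem.Str.isIn_iff_infix, ← PySem.Chars.isIn_iff_infix,
      ← PySem.Chars.exists_prefix_drop_iff_isIn]
  constructor
  · rintro ⟨-, i, hi0, hib, hs⟩
    refine ⟨i.toNat, ?_⟩
    rw [PySem.List.slice_from _ hi0, PySem.Chars.startswith_iff] at hs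
    exact hs
  · rintro ⟨j, hj⟩
    refine ⟨hx, (j : Int), by positivity, ?_, ?_⟩
    · have hjlen : j < t.toList.length := by
        by_contra hcon
        simp only [not_lt] at hcon
        rw [List.drop_eq_nil_of_le hcon] at hj
        exact hne (List.prefix_nil.mp hj)
      have hlen : PySem.Str.len t = (t.toList.length : Int) := by simp
      rw [hlen]
      exact_mod_cast hjlen
    · rw [PySem.List.slice_from _ (by positivity), PySem.Chars.startswith_iff]
      simpa using hj

-- B's membership count equals A's substring count on any sublist of the patterns
theorem pv_count_eq (t : String) (l : List String) (hsub : ∀ w ∈ l, w ∈ pvPatterns)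
    (hne : ∀ w ∈ l, w.toList ≠ []) :
    l.countP (fun w => PySem.Set.contains (pvSweep t) w)
      = l.countP (fun w => PySem.Str.isIn w t) := by
  apply List.countP_congr
  intro w hw
  have h1 := pv_sweep_found t w (hsub w hw) (hne w hw)
  rw [← PySem.Set.contains_iff] at h1
  exact h1

-- ===== VERDICT (by name: the statement is the Claim_ definition above) =====
theorem detect_document_language_spec : Claim_equal_detect_document_language := by
  intro text _
  unfold Spec_detect_document_language detect_document_language detect_document_language_alt
  by_cases h : text = ""
  · simp [h]
  · have hes := pv_count_eq (PySem.Str.lower text)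
      ["el", "la", "de", "que", "y", "en", "un", "es", "se", "no"] (by decide) (by decide)
    have hfr := pv_count_eq (PySem.Str.lower text)
      ["le", "de", "et", "à", "un", "il", "être", "et", "en", "avoir"] (by decide) (by decide)
    have hde := pv_count_eq (PySem.Str.lower text)
      ["der", "die", "und", "in", "den", "von", "zu", "das", "mit", "sich"] (by decide) (by decide)
    simp only [h, if_false, pvScore, pv_foldl_count, zero_add, pvSpanish, pvFrench, pvGerman]
    rw [hes, hfr, hde]
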